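-- pv_equiv track=rewrite | github.com/Psikyy/KATARENGA-Co | Katarenga&Co.py | checkRed
-- ===== SOURCE A (Python) =====
-- def checkRed(pawn : tuple, case : tuple, board : list, tab_R : list) -> bool:
--     """
--         Vérifie si un déplacement horizontal ou vertical est possible pour un pion partant d'une case rouge,
--         en s'assurant qu'il ne traverse pas d'autres cases rouges.
--     """
--     temp_red = [elt for elt in tab_R if elt != pawn]
--     x, y = pawn
--     i, j = case
--     if x != i and y != j:
--         return False
--     dx = 1 if i > x else -1 if i < x else 0
--     dy = 1 if j > y else -1 if j < y else 0
--     current_x, current_y = x, y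
--     while (current_x, current_y) != (i, j):
--         current_x += dx
--         current_y += dy
--         if (current_x, current_y) in temp_red:
--             return False
--     return True
-- ===== SOURCE B (Python) =====
-- def checkRed(pawn, case, board, tab_R):
--     x, y = pawn
--     i, j = case
--     if x != i and y != j:
--         return False
--     for r in tab_R:
--         if r == pawn:
--             continue
--         rx, ry = r
--         if x == i:
--             d = j - y
--             off = ry - y
--             hit = rx == x and (1 <= off <= d or d <= off <= -1)
--         else:
--             d = i - x
--             off = rx - x
--             hit = ry == y and (1 <= off <= d or d <= off <= -1)
--         if hit:
--             return False
--     return True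
-- ===== Notes on version B (the rewrite author's own statement) =====
-- stated objective: alternative
-- what changed: Instead of walking the path cell by cell and testing membership in the filtered red list at each step, B makes a single pass over tab_R and tests arithmetically whether each red cell lies on the half-open travelled segment (pawn, case].
import Mathlib
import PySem

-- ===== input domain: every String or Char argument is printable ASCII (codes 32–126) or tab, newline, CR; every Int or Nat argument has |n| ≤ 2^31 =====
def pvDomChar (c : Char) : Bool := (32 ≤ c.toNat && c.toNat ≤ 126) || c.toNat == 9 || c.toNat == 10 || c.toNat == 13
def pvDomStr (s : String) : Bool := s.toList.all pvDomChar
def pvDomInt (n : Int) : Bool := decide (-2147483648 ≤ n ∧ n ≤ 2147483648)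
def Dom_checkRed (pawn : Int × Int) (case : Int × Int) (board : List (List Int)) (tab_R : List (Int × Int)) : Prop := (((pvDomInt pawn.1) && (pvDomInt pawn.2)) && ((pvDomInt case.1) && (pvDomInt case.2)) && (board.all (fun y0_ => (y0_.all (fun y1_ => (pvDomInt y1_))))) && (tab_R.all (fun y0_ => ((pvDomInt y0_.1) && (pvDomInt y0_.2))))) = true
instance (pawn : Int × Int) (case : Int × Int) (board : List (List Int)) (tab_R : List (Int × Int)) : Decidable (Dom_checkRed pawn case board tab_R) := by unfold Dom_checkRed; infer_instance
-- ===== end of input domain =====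

-- B replaces A's cell-by-cell walk of the travelled segment (membership test per step) by one
-- arithmetic pass over tab_R testing whether each red cell lies on the segment (pawn, case]
-- (objective: alternative algorithm, no walk over the distance).

-- ===== PORT A =====
-- A's while loop; the fuel is |i-x|+|j-y|, which (given A's guards) is exactly the number of
-- iterations: the while condition (current ≠ case) is equivalent to fuel > 0 in every reachable state.
def pvLoopA (tempRed : List (Int × Int)) (dx dy : Int) : Nat → Int → Int → Bool
  | 0, _, _ => true
  | n+1, cx, cy =>
      let cx' := cx + dx
      let cy' := cy + dy
      if (cx', cy') ∈ tempRed then false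
      else pvLoopA tempRed dx dy n cx' cy'

def checkRed (pawn : Int × Int) (case : Int × Int) (board : List (List Int)) (tab_R : List (Int × Int)) : Bool :=
  let tempRed := tab_R.filter (fun elt => elt ≠ pawn)
  let x := pawn.1; let y := pawn.2
  let i := case.1; let j := case.2
  if x ≠ i ∧ y ≠ j then false
  else
    let dx : Int := if i > x then 1 else if i < x then -1 else 0
    let dy : Int := if j > y then 1 else if j < y then -1 else 0
    pvLoopA tempRed dx dy ((i - x).natAbs + (j - y).natAbs) x y

-- ===== PORT B =====
def pvHit (pawn : Int × Int) (case : Int × Int) (r : Int × Int) : Bool :=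
  if pawn.1 = case.1 then
    let d := case.2 - pawn.2
    let off := r.2 - pawn.2
    decide (r.1 = pawn.1 ∧ ((1 ≤ off ∧ off ≤ d) ∨ (d ≤ off ∧ off ≤ -1)))
  else
    let d := case.1 - pawn.1
    let off := r.1 - pawn.1
    decide (r.2 = pawn.2 ∧ ((1 ≤ off ∧ off ≤ d) ∨ (d ≤ off ∧ off ≤ -1)))

def checkRed_alt (pawn : Int × Int) (case : Int × Int) (board : List (List Int)) (tab_R : List (Int × Int)) : Bool :=
  if pawn.1 ≠ case.1 ∧ pawn.2 ≠ case.2 then false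
  else !(tab_R.any (fun r => decide (r ≠ pawn) && pvHit pawn case r))

-- ===== PRECONDITION & SPEC =====
def Spec_checkRed (pawn : Int × Int) (case : Int × Int) (board : List (List Int)) (tab_R : List (Int × Int)) (out : Bool) : Prop := out = checkRed_alt pawn case board tab_R
instance (pawn : Int × Int) (case : Int × Int) (board : List (List Int)) (tab_R : List (Int × Int)) (out : Bool) : Decidable (Spec_checkRed pawn case board tab_R out) := by unfold Spec_checkRed; infer_instance

-- ===== CLAIM (what is proved, stated in full; the proofs are below) =====
def Claim_equal_checkRed : Prop := ∀ (pawn : Int × Int) (case : Int × Int) (board : List (List Int)) (tab_R : List (Int × Int)), Dom_checkRed pawn case board tab_R → Spec_checkRed pawn case board tab_R (checkRed pawn case board tab_R)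

-- ===== LEMMAS AND PROOFS =====

-- A's loop returns true iff none of the cells pawn + k·(dx,dy), k = 1..n, is in tempRed.
theorem pvLoopA_eq_true_iff (tempRed : List (Int × Int)) (dx dy : Int) :
    ∀ (n : Nat) (cx cy : Int),
      pvLoopA tempRed dx dy n cx cy = true ↔
        ∀ k : Nat, 1 ≤ k → k ≤ n → (cx + k * dx, cy + k * dy) ∉ tempRed := by
  intro n
  induction n with
  | zero => intro cx cy; simp [pvLoopA]; intro k h1 h2; omega
  | succ m ih =>
      intro cx cy
      simp only [pvLoopA]
      by_cases hmem : (cx + dx, cy + dy) ∈ tempRed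
      · simp only [hmem, if_pos]
        constructor
        · intro h; cases h
        · intro h
          exfalso
          exact (h 1 le_rfl (by omega)) (by simpa using hmem)
      · simp only [hmem, if_neg, not_false_iff]
        rw [ih]
        constructor
        · intro h k hk1 hk2
          match k, hk1 with
          | 1, _ => simpa using hmem
          | (k'+2), _ =>
              have := h (k' + 1) (by omega) (by omega)
              have e1 : cx + dx + ((k' : Int) + 1) * dx = cx + ((k' : Int) + 2) * dx := by ring
              have e2 : cy + dy + ((k' : Int) + 1) * dy = cy + ((k' : Int) + 2) * dy := by ring
              push_cast at this ⊢
              rwa [e1, e2] at this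
        · intro h k hk1 hk2
          have := h (k + 1) (by omega) (by omega)
          have e1 : cx + ((k : Int) + 1) * dx = cx + dx + (k : Int) * dx := by ring
          have e2 : cy + ((k : Int) + 1) * dy = cy + dy + (k : Int) * dy := by ring
          push_cast at this ⊢
          rwa [e1, e2] at this

-- pvHit on a vertical move (pawn and case share the first coordinate), as a proposition
theorem pvHit_vert (x y j rx ry : Int) :
    pvHit (x, y) (x, j) (rx, ry) = false ↔
      ¬(rx = x ∧ ((1 ≤ ry - y ∧ ry - y ≤ j - y) ∨ (j - y ≤ ry - y ∧ ry - y ≤ -1))) := by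
  unfold pvHit
  rw [if_pos rfl, decide_eq_false_iff_not]

-- pvHit on a horizontal move (distinct first coordinates), as a proposition
theorem pvHit_horiz (x y i j rx ry : Int) (hx : x ≠ i) :
    pvHit (x, y) (i, j) (rx, ry) = false ↔
      ¬(ry = y ∧ ((1 ≤ rx - x ∧ rx - x ≤ i - x) ∨ (i - x ≤ rx - x ∧ rx - x ≤ -1))) := by
  unfold pvHit
  rw [if_neg hx, decide_eq_false_iff_not]

theorem checkRed_spec_aux (pawn : Int × Int) (case : Int × Int) (board : List (List Int)) (tab_R : List (Int × Int)) :
    checkRed pawn case board tab_R = checkRed_alt pawn case board tab_R := by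
  obtain ⟨x, y⟩ := pawn
  obtain ⟨i, j⟩ := case
  rw [Bool.eq_iff_iff]
  unfold checkRed checkRed_alt
  by_cases hguard : x ≠ i ∧ y ≠ j
  · simp [hguard]
  · simp only [hguard, if_neg, not_false_iff]
    simp only [List.any_eq_true, Bool.not_eq_true', Bool.and_eq_true, decide_eq_true_eq,
      List.any_eq_false, not_and, Bool.not_eq_true]
    rw [pvLoopA_eq_true_iff]
    by_cases hx : x = i
    · -- vertical move
      subst hx
      have hdx : (if x > x then (1:Int) else if x < x then -1 else 0) = 0 := by simp
      rcases lt_trichotomy y j with hy | hy | hy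
      · -- j > y, dy = 1
        have hdy : (if j > y then (1:Int) else if j < y then -1 else 0) = 1 := if_pos hy
        simp only [hdx, hdy, mul_zero, mul_one, add_zero]
        constructor
        · intro h r hr hne
          obtain ⟨rx, ry⟩ := r
          rw [pvHit_vert]
          rintro ⟨hrx, hoff⟩
          have hoff' : 1 ≤ ry - y ∧ ry - y ≤ j - y := by rcases hoff with h1 | h1 <;> omega
          refine h (ry - y).toNat (by omega) (by omega) ?_
          have hpair : (x, y + (((ry - y).toNat : Int))) = (rx, ry) := by
            simp only [Prod.mk.injEq]
            omega
          rw [hpair]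
          exact List.mem_filter.mpr ⟨hr, by simpa using (if h1 : rx = x then Or.inr (fun h2 => hne (by rw [h1, h2])) else Or.inl h1)⟩
        · intro h k hk1 hk2 hmem
          obtain ⟨hin, hdec⟩ := List.mem_filter.mp hmem
          have hne : (x, y + (k : Int)) ≠ (x, y) := by simpa using hdec
          have hf := h _ hin hne
          rw [pvHit_vert] at hf
          exact hf ⟨rfl, Or.inl ⟨by omega, by omega⟩⟩
      · -- pawn = case : empty path, and no offset lies in an empty range
        subst hy
        have hdy : (if y > y then (1:Int) else if y < y then -1 else 0) = 0 := by simp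
        simp only [hdx, hdy, mul_zero, add_zero]
        constructor
        · intro _ r hr hne
          obtain ⟨rx, ry⟩ := r
          rw [pvHit_vert]
          rintro ⟨_, h1 | h1⟩ <;> omega
        · intro _ k hk1 hk2 _
          omega
      · -- j < y, dy = -1
        have hdy : (if j > y then (1:Int) else if j < y then -1 else 0) = -1 := by
          rw [if_neg (by omega), if_pos hy]
        simp only [hdx, hdy, mul_zero, add_zero, mul_neg_one]
        constructor
        · intro h r hr hne
          obtain ⟨rx, ry⟩ := r
          rw [pvHit_vert]
          rintro ⟨hrx, hoff⟩
          have hoff' : j - y ≤ ry - y ∧ ry - y ≤ -1 := by rcases hoff with h1 | h1 <;> omega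
          refine h (y - ry).toNat (by omega) (by omega) ?_
          have hpair : (x, y + -(((y - ry).toNat : Int))) = (rx, ry) := by
            simp only [Prod.mk.injEq]
            omega
          rw [hpair]
          exact List.mem_filter.mpr ⟨hr, by simpa using (if h1 : rx = x then Or.inr (fun h2 => hne (by rw [h1, h2])) else Or.inl h1)⟩
        · intro h k hk1 hk2 hmem
          obtain ⟨hin, hdec⟩ := List.mem_filter.mp hmem
          have hne : (x, y + -(k : Int)) ≠ (x, y) := by simpa using hdec
          have hf := h _ hin hne
          rw [pvHit_vert] at hf
          exact hf ⟨rfl, Or.inr ⟨by omega, by omega⟩⟩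
    · -- horizontal move: x ≠ i forces y = j
      have hyj : y = j := by tauto
      subst hyj
      have hdy : (if y > y then (1:Int) else if y < y then -1 else 0) = 0 := by simp
      rcases lt_trichotomy x i with hxi | hxi | hxi
      · -- i > x, dx = 1
        have hdx : (if i > x then (1:Int) else if i < x then -1 else 0) = 1 := if_pos hxi
        simp only [hdx, hdy, mul_zero, mul_one, add_zero]
        constructor
        · intro h r hr hne
          obtain ⟨rx, ry⟩ := r
          rw [pvHit_horiz _ _ _ _ _ _ hx]
          rintro ⟨hry, hoff⟩
          have hoff' : 1 ≤ rx - x ∧ rx - x ≤ i - x := by rcases hoff with h1 | h1 <;> omega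
          refine h (rx - x).toNat (by omega) (by omega) ?_
          have hpair : (x + (((rx - x).toNat : Int)), y) = (rx, ry) := by
            simp only [Prod.mk.injEq]
            omega
          rw [hpair]
          exact List.mem_filter.mpr ⟨hr, by simpa using (if h1 : rx = x then Or.inr (fun h2 => hne (by rw [h1, h2])) else Or.inl h1)⟩
        · intro h k hk1 hk2 hmem
          obtain ⟨hin, hdec⟩ := List.mem_filter.mp hmem
          have hne : (x + (k : Int), y) ≠ (x, y) := by simpa using hdec
          have hf := h _ hin hne
          rw [pvHit_horiz _ _ _ _ _ _ hx] at hf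
          exact hf ⟨rfl, Or.inl ⟨by omega, by omega⟩⟩
      · exact absurd hxi hx
      · -- i < x, dx = -1
        have hdx : (if i > x then (1:Int) else if i < x then -1 else 0) = -1 := by
          rw [if_neg (by omega), if_pos hxi]
        simp only [hdx, hdy, mul_zero, add_zero, mul_neg_one]
        constructor
        · intro h r hr hne
          obtain ⟨rx, ry⟩ := r
          rw [pvHit_horiz _ _ _ _ _ _ hx]
          rintro ⟨hry, hoff⟩
          have hoff' : i - x ≤ rx - x ∧ rx - x ≤ -1 := by rcases hoff with h1 | h1 <;> omega
          refine h (x - rx).toNat (by omega) (by omega) ?_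
          have hpair : (x + -(((x - rx).toNat : Int)), y) = (rx, ry) := by
            simp only [Prod.mk.injEq]
            omega
          rw [hpair]
          exact List.mem_filter.mpr ⟨hr, by simpa using (if h1 : rx = x then Or.inr (fun h2 => hne (by rw [h1, h2])) else Or.inl h1)⟩
        · intro h k hk1 hk2 hmem
          obtain ⟨hin, hdec⟩ := List.mem_filter.mp hmem
          have hne : (x + -(k : Int), y) ≠ (x, y) := by simpa using hdec
          have hf := h _ hin hne
          rw [pvHit_horiz _ _ _ _ _ _ hx] at hf
          exact hf ⟨rfl, Or.inr ⟨by omega, by omega⟩⟩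

-- ===== VERDICT (by name: the statement is the Claim_ definition above) =====
theorem checkRed_spec : Claim_equal_checkRed := by
  intro pawn case board tab_R _
  unfold Spec_checkRed
  exact checkRed_spec_aux pawn case board tab_R
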